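-- pv_equiv track=rewrite | github.com/dendi239/advent-of-code | 2024-05-print-queue/part-one.py | find_worthy
-- ===== SOURCE A (Python) =====
-- def find_worthy(rs, ss):
--     rs = set(rs)
--     for s in ss:
--         if all(
--             (s[i2], s[i1]) not in rs
--             for i1 in range(len(s))
--             for i2 in range(i1 + 1, len(s))
--         ):
--             yield s
-- ===== SOURCE B (Python) =====
-- def _violates(r, first, last):
--     if len(r) != 2:
--         return False
--     a, b = r
--     fb = first.get(b)
--     la = last.get(a)
--     return fb is not None and la is not None and fb < la
--
--
-- def find_worthy(rs, ss):
--     for s in ss: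
--         last = {x: i for i, x in enumerate(s)}
--         first = {x: i for i, x in reversed(list(enumerate(s)))}
--         if not any(_violates(r, first, last) for r in rs):
--             yield s
-- ===== Notes on version B (the rewrite author's own statement) =====
-- stated objective: faster
-- what changed: Instead of testing every ordered pair of positions in each sequence against the rule set (O(n^2) per sequence), B builds first/last-occurrence index maps in one pass and checks each rule once against them.
import Mathlib
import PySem

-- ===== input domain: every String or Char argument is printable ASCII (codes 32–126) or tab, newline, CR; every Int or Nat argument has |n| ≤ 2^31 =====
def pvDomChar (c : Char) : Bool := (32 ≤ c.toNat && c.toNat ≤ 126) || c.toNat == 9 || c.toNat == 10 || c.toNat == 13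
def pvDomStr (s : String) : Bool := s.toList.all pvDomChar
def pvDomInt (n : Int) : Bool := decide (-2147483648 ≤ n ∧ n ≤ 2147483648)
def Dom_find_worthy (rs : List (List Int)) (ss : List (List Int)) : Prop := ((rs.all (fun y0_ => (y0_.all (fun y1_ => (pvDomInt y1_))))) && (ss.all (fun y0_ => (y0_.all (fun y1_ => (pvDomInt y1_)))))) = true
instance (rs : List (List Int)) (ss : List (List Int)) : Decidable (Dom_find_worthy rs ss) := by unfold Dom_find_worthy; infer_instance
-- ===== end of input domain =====

-- B replaces A's all-ordered-pairs scan of each sequence by first/last-occurrence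
-- index maps built in one pass, checking each rule once (faster: O(n+R) vs O(n^2·) per sequence).

-- ===== PORT A =====
-- generator consumed as a list; per-sequence check over all i1 < i2 pairs
def find_worthy (rs : List (List Int)) (ss : List (List Int)) : List (List Int) :=
  let rsS : PySem.Set (List Int) := PySem.Set.ofList rs
  ss.filter (fun s =>
    (PySem.List.pyRange 0 s.length 1).all (fun i1 =>
      (PySem.List.pyRange (i1 + 1) s.length 1).all (fun i2 =>
        ! (PySem.Set.contains rsS [PySem.List.pyGetD s i2 0, PySem.List.pyGetD s i1 0]))))

-- ===== PORT B =====
-- _violates(r, first, last)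
def pvViolates (r : List Int) (first last : PySem.Dict Int Int) : Bool :=
  match r with
  | [a, b] =>
    match first.get? b, last.get? a with
    | some fb, some la => decide (fb < la)
    | _, _ => false
  | _ => false

def find_worthy_alt (rs : List (List Int)) (ss : List (List Int)) : List (List Int) :=
  ss.filter (fun s =>
    let last := (PySem.List.enumerate s 0).foldl (fun d p => d.insert p.2 p.1) PySem.Dict.empty
    let first := ((PySem.List.enumerate s 0).reverse).foldl (fun d p => d.insert p.2 p.1) PySem.Dict.empty
    ! rs.any (fun r => pvViolates r first last))

-- ===== PRECONDITION & SPEC =====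
def Spec_find_worthy (rs : List (List Int)) (ss : List (List Int)) (out : List (List Int)) : Prop := out = find_worthy_alt rs ss
instance (rs : List (List Int)) (ss : List (List Int)) (out : List (List Int)) : Decidable (Spec_find_worthy rs ss out) := by unfold Spec_find_worthy; infer_instance

-- ===== CLAIM (what is proved, stated in full; the proofs are below) =====
def Claim_equal_find_worthy : Prop := ∀ (rs : List (List Int)) (ss : List (List Int)), Dom_find_worthy rs ss → Spec_find_worthy rs ss (find_worthy rs ss)

-- ===== LEMMAS AND PROOFS =====

-- index of the LAST occurrence of x in s (proof-side helper)
def pvLastIdx (s : List Int) (x : Int) : Option Nat :=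
  match s with
  | [] => none
  | y :: t =>
    match pvLastIdx t x with
    | some j => some (j + 1)
    | none => if y = x then some 0 else none

-- index of the FIRST occurrence of x in s (proof-side helper)
def pvFirstIdx (s : List Int) (x : Int) : Option Nat :=
  match s with
  | [] => none
  | y :: t => if y = x then some 0 else (pvFirstIdx t x).map (· + 1)

theorem pvLastIdx_sound (s : List Int) (x : Int) (j : Nat) (h : pvLastIdx s x = some j) :
    j < s.length ∧ s.getD j 0 = x := by
  induction s generalizing j with
  | nil => simp [pvLastIdx] at h
  | cons y t ih =>
    simp only [pvLastIdx] at h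
    cases hl : pvLastIdx t x with
    | some j' =>
      rw [hl] at h
      obtain ⟨hlt, hget⟩ := ih j' hl
      cases h
      constructor
      · simpa using Nat.succ_lt_succ hlt
      · simpa using hget
    | none =>
      rw [hl] at h
      split_ifs at h with hy
      · cases h; simp [hy]

theorem pvLastIdx_ge (s : List Int) (x : Int) (k : Nat) (hk : k < s.length)
    (hx : s.getD k 0 = x) : ∃ j, pvLastIdx s x = some j ∧ k ≤ j := by
  induction s generalizing k with
  | nil => simp at hk
  | cons y t ih =>
    cases k with
    | zero =>
      simp at hx
      cases hl : pvLastIdx t x with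
      | some j' => exact ⟨j' + 1, by simp [pvLastIdx, hl], by omega⟩
      | none => exact ⟨0, by simp [pvLastIdx, hl, hx], le_refl 0⟩
    | succ k' =>
      simp at hk hx
      obtain ⟨j', hj', hle⟩ := ih k' hk hx
      exact ⟨j' + 1, by simp [pvLastIdx, hj'], by omega⟩

theorem pvFirstIdx_sound (s : List Int) (x : Int) (j : Nat) (h : pvFirstIdx s x = some j) :
    j < s.length ∧ s.getD j 0 = x := by
  induction s generalizing j with
  | nil => simp [pvFirstIdx] at h
  | cons y t ih =>
    simp only [pvFirstIdx] at h
    split_ifs at h with hy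
    · cases h; simp [hy]
    · cases hf : pvFirstIdx t x with
      | some j' =>
        rw [hf] at h
        simp at h
        obtain ⟨hlt, hget⟩ := ih j' hf
        subst h
        constructor
        · simpa using Nat.succ_lt_succ hlt
        · simpa using hget
      | none => rw [hf] at h; simp at h

theorem pvFirstIdx_le (s : List Int) (x : Int) (k : Nat) (hk : k < s.length)
    (hx : s.getD k 0 = x) : ∃ j, pvFirstIdx s x = some j ∧ j ≤ k := by
  induction s generalizing k with
  | nil => simp at hk
  | cons y t ih =>
    by_cases hy : y = x
    · exact ⟨0, by simp [pvFirstIdx, hy], Nat.zero_le k⟩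
    · cases k with
      | zero => simp at hx; exact absurd hx hy
      | succ k' =>
        simp at hk hx
        obtain ⟨j', hj', hle⟩ := ih k' hk hx
        exact ⟨j' + 1, by simp [pvFirstIdx, hy, hj'], by omega⟩

-- the fold step on an option accumulator
def pvStep (x : Int) : Option Int → Int × Int → Option Int :=
  fun acc p => if p.2 = x then some p.1 else acc

theorem get?_foldl_insert (l : List (Int × Int)) (d : PySem.Dict Int Int) (x : Int) :
    (l.foldl (fun d p => d.insert p.2 p.1) d).get? x = l.foldl (pvStep x) (d.get? x) := by
  induction l generalizing d with
  | nil => rfl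
  | cons p t ih =>
    simp only [List.foldl_cons, ih, pvStep, PySem.Dict.get?_insert]
    rcases eq_or_ne p.2 x with h | h
    · simp [h]
    · simp [h, Ne.symm h]

theorem foldl_step_enumerate (s : List Int) (x : Int) (k : Int) (o : Option Int) :
    (PySem.List.enumerate s k).foldl (pvStep x) o =
      match pvLastIdx s x with
      | some j => some (k + j)
      | none => o := by
  induction s generalizing k o with
  | nil => simp [PySem.List.enumerate_nil, pvLastIdx]
  | cons y t ih =>
    rw [PySem.List.enumerate_cons, List.foldl_cons, ih]
    cases hl : pvLastIdx t x with
    | some j => simp [pvLastIdx, hl]; ring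
    | none =>
      by_cases hy : y = x <;> simp [pvLastIdx, hl, hy, pvStep]

theorem foldl_step_enumerate_reverse (s : List Int) (x : Int) (k : Int) (o : Option Int) :
    ((PySem.List.enumerate s k).reverse).foldl (pvStep x) o =
      match pvFirstIdx s x with
      | some j => some (k + j)
      | none => o := by
  induction s generalizing k o with
  | nil => simp [PySem.List.enumerate_nil, pvFirstIdx]
  | cons y t ih =>
    rw [PySem.List.enumerate_cons, List.reverse_cons, List.foldl_append, ih]
    by_cases hy : y = x
    · cases hf : pvFirstIdx t x with
      | some j => simp [pvFirstIdx, hy, pvStep]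
      | none => simp [pvFirstIdx, hy, pvStep]
    · cases hf : pvFirstIdx t x with
      | some j => simp [pvFirstIdx, hy, hf, pvStep]; ring
      | none => simp [pvFirstIdx, hy, hf, pvStep]

theorem last_get? (s : List Int) (x : Int) :
    ((PySem.List.enumerate s 0).foldl (fun d p => d.insert p.2 p.1) PySem.Dict.empty).get? x =
      (pvLastIdx s x).map (fun j => (j : Int)) := by
  rw [get?_foldl_insert, PySem.Dict.get?_empty, foldl_step_enumerate]
  cases pvLastIdx s x <;> simp

theorem first_get? (s : List Int) (x : Int) :
    (((PySem.List.enumerate s 0).reverse).foldl (fun d p => d.insert p.2 p.1) PySem.Dict.empty).get? x =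
      (pvFirstIdx s x).map (fun j => (j : Int)) := by
  rw [get?_foldl_insert, PySem.Dict.get?_empty, foldl_step_enumerate_reverse]
  cases pvFirstIdx s x <;> simp

theorem pyGetD_toNat (s : List Int) (i : Int) (h0 : 0 ≤ i) :
    PySem.List.pyGetD s i 0 = s.getD i.toNat 0 := by
  rw [show i = ((i.toNat : Nat) : Int) by omega, PySem.List.pyGetD_natCast]
  simp
  rw [max_eq_left h0]

theorem pvViolates_true (r : List Int) (f l : PySem.Dict Int Int) :
    pvViolates r f l = true ↔
      ∃ a b fb la, r = [a, b] ∧ f.get? b = some fb ∧ l.get? a = some la ∧ fb < la := by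
  unfold pvViolates
  rcases r with _ | ⟨a, _ | ⟨b, _ | ⟨c, t⟩⟩⟩
  · simp
  · simp
  · cases hf : f.get? b <;> cases hl : l.get? a <;> simp [hf, hl]
  · simp

-- the per-sequence predicates agree
theorem pred_eq (rs : List (List Int)) (s : List Int) :
    ((PySem.List.pyRange 0 s.length 1).all (fun i1 =>
      (PySem.List.pyRange (i1 + 1) s.length 1).all (fun i2 =>
        ! (PySem.Set.contains (PySem.Set.ofList rs) [PySem.List.pyGetD s i2 0, PySem.List.pyGetD s i1 0])))) =
    (! rs.any (fun r => pvViolates r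
        (((PySem.List.enumerate s 0).reverse).foldl (fun d p => d.insert p.2 p.1) PySem.Dict.empty)
        ((PySem.List.enumerate s 0).foldl (fun d p => d.insert p.2 p.1) PySem.Dict.empty))) := by
  rw [Bool.eq_iff_iff]
  simp only [List.all_eq_true, Bool.not_eq_eq_eq_not, Bool.not_true, List.any_eq_false,
    PySem.List.mem_pyRange_one]
  constructor
  · -- no bad pair → no violated rule
    intro h r hr hv
    rw [pvViolates_true] at hv
    obtain ⟨a, b, fb', la', hreq, hgf, hgl, hflt'⟩ := hv
    rw [first_get?] at hgf
    rw [last_get?] at hgl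
    cases hf : pvFirstIdx s b with
    | none => rw [hf] at hgf; simp at hgf
    | some fb =>
      cases hl : pvLastIdx s a with
      | none => rw [hl] at hgl; simp at hgl
      | some la =>
        rw [hf] at hgf; rw [hl] at hgl
        have hfb' : fb' = (fb : Int) := by simpa using hgf.symm
        have hla' : la' = (la : Int) := by simpa using hgl.symm
        subst hfb' hla'
        have hflt : (fb : Int) < (la : Int) := hflt'
        obtain ⟨hfb, hsb⟩ := pvFirstIdx_sound s b fb hf
        obtain ⟨hla, hsa⟩ := pvLastIdx_sound s a la hl
        have hthis := h (fb : Int) ⟨Int.natCast_nonneg fb, by exact_mod_cast hfb⟩ (la : Int)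
          ⟨by omega, by exact_mod_cast hla⟩
        rw [PySem.List.pyGetD_natCast, PySem.List.pyGetD_natCast, hsa, hsb] at hthis
        simp [PySem.Set.mem_ofList] at hthis
        exact hthis (hreq ▸ hr)
  · -- no violated rule → no bad pair
    intro h i1 hi1 i2 hi2
    by_contra hmem
    simp only [Bool.not_eq_false] at hmem
    have hmem' : [PySem.List.pyGetD s i2 0, PySem.List.pyGetD s i1 0] ∈ rs := by
      simpa [PySem.Set.contains_iff, PySem.Set.mem_ofList] using hmem
    have h2 := h _ hmem'
    set a := PySem.List.pyGetD s i2 0 with ha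
    set b := PySem.List.pyGetD s i1 0 with hb
    have h0i1 : 0 ≤ i1 := hi1.1
    have hi1n : i1.toNat < s.length := by omega
    have hi2n : i2.toNat < s.length := by omega
    have hsb : s.getD i1.toNat 0 = b := by rw [hb, pyGetD_toNat s i1 h0i1]
    have hsa : s.getD i2.toNat 0 = a := by rw [ha, pyGetD_toNat s i2 (by omega)]
    obtain ⟨fb, hfb, hfble⟩ := pvFirstIdx_le s b i1.toNat hi1n hsb
    obtain ⟨la, hla, hlage⟩ := pvLastIdx_ge s a i2.toNat hi2n hsa
    rw [pvViolates_true] at h2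
    exact h2 ⟨a, b, (fb : Int), (la : Int),
      rfl,
      by rw [first_get?, hfb]; rfl,
      by rw [last_get?, hla]; rfl,
      by omega⟩

-- ===== VERDICT (by name: the statement is the Claim_ definition above) =====
theorem find_worthy_spec : Claim_equal_find_worthy := by
  intro rs ss _
  unfold Spec_find_worthy find_worthy find_worthy_alt
  simp only []
  apply List.filter_congr
  intro s _
  exact pred_eq rs s
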